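-- pv_equiv track=rewrite | github.com/ping/libby-calibre-plugin | calibre-plugin/overdrive/client.py | sort_availabilities
-- ===== SOURCE A (Python) =====
-- def sort_availabilities(a, b):
--     for key, default, fn in [
--         ("isAvailable", False, None),
--         ("luckyDayAvailableCopies", 0, None),
--         ("estimatedWaitDays", 9999, lambda v: -1 * v),
--         ("holdsRatio", 9999, lambda v: -1 * v),
--         ("ownedCopies", 0, None),
--     ]:
--         value_a = a.get(key, default)
--         value_b = b.get(key, default)
--         if fn:
--             value_a = fn(value_a)
--             value_b = fn(value_b)
--         if value_a > value_b:
--             return 1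
--         if value_a < value_b:
--             return -1
--     return 0
-- ===== SOURCE B (Python) =====
-- def sort_availabilities(a, b):
--     # Positional packing: each field difference is weighted by a power of
--     # W = 2**36, large enough that any nonzero difference in a more significant
--     # field outweighs the combined range of all less significant ones (field
--     # values are 32-bit in this domain); the result is the sign of one integer.
--     W = 1 << 36
--     score = (
--         (a.get("isAvailable", False) - b.get("isAvailable", False)) * W ** 4
--         + (a.get("luckyDayAvailableCopies", 0) - b.get("luckyDayAvailableCopies", 0)) * W ** 3
--         + (b.get("estimatedWaitDays", 9999) - a.get("estimatedWaitDays", 9999)) * W ** 2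
--         + (b.get("holdsRatio", 9999) - a.get("holdsRatio", 9999)) * W
--         + (a.get("ownedCopies", 0) - b.get("ownedCopies", 0))
--     )
--     return (score > 0) - (score < 0)
-- ===== Notes on version B (the rewrite author's own statement) =====
-- stated objective: alternative
-- what changed: Replaced the early-exit field-by-field comparison cascade with positional packing: the five signed field differences are combined into one base-2^36 weighted integer score (valid for the 32-bit values of the stated domain) and its sign is returned.
import Mathlib
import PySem

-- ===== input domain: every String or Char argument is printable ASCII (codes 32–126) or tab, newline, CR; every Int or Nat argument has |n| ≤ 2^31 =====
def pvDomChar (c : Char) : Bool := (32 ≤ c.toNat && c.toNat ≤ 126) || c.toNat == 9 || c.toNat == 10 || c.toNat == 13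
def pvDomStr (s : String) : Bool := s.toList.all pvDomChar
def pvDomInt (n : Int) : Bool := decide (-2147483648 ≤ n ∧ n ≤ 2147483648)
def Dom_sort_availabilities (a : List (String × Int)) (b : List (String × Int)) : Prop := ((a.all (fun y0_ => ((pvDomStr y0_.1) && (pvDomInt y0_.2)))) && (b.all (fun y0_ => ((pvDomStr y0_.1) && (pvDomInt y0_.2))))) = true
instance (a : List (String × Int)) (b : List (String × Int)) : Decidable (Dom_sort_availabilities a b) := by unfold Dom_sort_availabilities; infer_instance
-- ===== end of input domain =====

-- B replaces A's early-exit field-by-field comparison cascade by packing the five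
-- signed field differences into ONE weighted integer (base 2^36 positional score,
-- valid for the 32-bit values of Dom) and returning its sign (alternative algorithm).

-- ===== PORT A =====
-- the loop over [(key, default, fn)]; fn is either None or the negation lambda,
-- modelled as a Bool flag; Python's default False for "isAvailable" compares as 0.
def sortAvailLoop (a b : List (String × Int)) : List (String × Int × Bool) → Int
  | [] => 0
  | (key, default, neg) :: rest =>
    let va := (PySem.Dict.mk a).getD key default
    let vb := (PySem.Dict.mk b).getD key default
    let va := if neg then -1 * va else va
    let vb := if neg then -1 * vb else vb
    if va > vb then 1
    else if va < vb then -1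
    else sortAvailLoop a b rest

def sort_availabilities (a : List (String × Int)) (b : List (String × Int)) : Int :=
  sortAvailLoop a b
    [("isAvailable", 0, false),
     ("luckyDayAvailableCopies", 0, false),
     ("estimatedWaitDays", 9999, true),
     ("holdsRatio", 9999, true),
     ("ownedCopies", 0, false)]

-- ===== PORT B =====
-- W = 1 << 36; score = weighted sum of field differences; result = its sign
def sort_availabilities_alt (a : List (String × Int)) (b : List (String × Int)) : Int :=
  let W : Int := (1 : Int) <<< 36
  let score :=
    ((PySem.Dict.mk a).getD "isAvailable" 0 - (PySem.Dict.mk b).getD "isAvailable" 0) * W ^ 4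
    + ((PySem.Dict.mk a).getD "luckyDayAvailableCopies" 0
        - (PySem.Dict.mk b).getD "luckyDayAvailableCopies" 0) * W ^ 3
    + ((PySem.Dict.mk b).getD "estimatedWaitDays" 9999
        - (PySem.Dict.mk a).getD "estimatedWaitDays" 9999) * W ^ 2
    + ((PySem.Dict.mk b).getD "holdsRatio" 9999
        - (PySem.Dict.mk a).getD "holdsRatio" 9999) * W
    + ((PySem.Dict.mk a).getD "ownedCopies" 0 - (PySem.Dict.mk b).getD "ownedCopies" 0)
  (if score > 0 then (1 : Int) else 0) - (if score < 0 then (1 : Int) else 0)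

-- ===== PRECONDITION & SPEC =====
def Spec_sort_availabilities (a : List (String × Int)) (b : List (String × Int)) (out : Int) : Prop := out = sort_availabilities_alt a b
instance (a : List (String × Int)) (b : List (String × Int)) (out : Int) : Decidable (Spec_sort_availabilities a b out) := by unfold Spec_sort_availabilities; infer_instance

-- ===== CLAIM (what is proved, stated in full; the proofs are below) =====
def Claim_equal_sort_availabilities : Prop := ∀ (a : List (String × Int)) (b : List (String × Int)), Dom_sort_availabilities a b → Spec_sort_availabilities a b (sort_availabilities a b)

-- ===== LEMMAS AND PROOFS =====
-- every value a getD with a default in [0, 9999] can yield on a 32-bit dict is 32-bit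
lemma getD_mk_bound (l : List (String × Int)) (k : String) (dflt : Int)
    (hl : ∀ p ∈ l, (pvDomInt p.2) = true) (hd : -2147483648 ≤ dflt ∧ dflt ≤ 2147483648) :
    -2147483648 ≤ (PySem.Dict.mk l).getD k dflt ∧ (PySem.Dict.mk l).getD k dflt ≤ 2147483648 := by
  induction l with
  | nil =>
    simpa [PySem.Dict.getD_eq_get?_getD, PySem.Dict.get?_empty] using hd
  | cons p rest ih =>
    obtain ⟨kv, v⟩ := p
    have hv : pvDomInt v = true := hl (kv, v) (List.mem_cons_self ..)
    have hv' : -2147483648 ≤ v ∧ v ≤ 2147483648 := by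
      simpa [pvDomInt] using hv
    have ih' := ih (fun q hq => hl q (List.mem_cons_of_mem _ hq))
    rw [PySem.Dict.getD_eq_get?_getD, PySem.Dict.get?_mk_cons]
    by_cases h : (kv == k) = true
    · simpa [h] using hv'
    · rw [if_neg h, ← PySem.Dict.getD_eq_get?_getD]
      exact ih'

-- the sign of the packed score is A's cascade verdict, for 32-bit field values
set_option maxHeartbeats 1600000 in
lemma packed_sign (x1 y1 x2 y2 x3 y3 x4 y4 x5 y5 : Int)
    (_h1a : -2147483648 ≤ x1 ∧ x1 ≤ 2147483648) (_h1b : -2147483648 ≤ y1 ∧ y1 ≤ 2147483648)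
    (h2a : -2147483648 ≤ x2 ∧ x2 ≤ 2147483648) (h2b : -2147483648 ≤ y2 ∧ y2 ≤ 2147483648)
    (h3a : -2147483648 ≤ x3 ∧ x3 ≤ 2147483648) (h3b : -2147483648 ≤ y3 ∧ y3 ≤ 2147483648)
    (h4a : -2147483648 ≤ x4 ∧ x4 ≤ 2147483648) (h4b : -2147483648 ≤ y4 ∧ y4 ≤ 2147483648)
    (h5a : -2147483648 ≤ x5 ∧ x5 ≤ 2147483648) (h5b : -2147483648 ≤ y5 ∧ y5 ≤ 2147483648) :
    (if x1 > y1 then (1 : Int) else if x1 < y1 then -1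
     else if x2 > y2 then 1 else if x2 < y2 then -1
     else if -1 * x3 > -1 * y3 then 1 else if -1 * x3 < -1 * y3 then -1
     else if -1 * x4 > -1 * y4 then 1 else if -1 * x4 < -1 * y4 then -1
     else if x5 > y5 then 1 else if x5 < y5 then -1 else 0)
    = (if (x1 - y1) * 22300745198530623141535718272648361505980416
         + (x2 - y2) * 324518553658426726783156020576256
         + (y3 - x3) * 4722366482869645213696
         + (y4 - x4) * 68719476736
         + (x5 - y5) > 0 then (1 : Int) else 0)
      - (if (x1 - y1) * 22300745198530623141535718272648361505980416
           + (x2 - y2) * 324518553658426726783156020576256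
           + (y3 - x3) * 4722366482869645213696
           + (y4 - x4) * 68719476736
           + (x5 - y5) < 0 then (1 : Int) else 0) := by
  split_ifs <;> omega

-- ===== VERDICT (by name: the statement is the Claim_ definition above) =====
theorem sort_availabilities_spec : Claim_equal_sort_availabilities := by
  intro a b hdom
  have hab : (∀ p ∈ a, (pvDomInt p.2) = true) ∧ (∀ p ∈ b, (pvDomInt p.2) = true) := by
    unfold Dom_sort_availabilities at hdom
    simp only [Bool.and_eq_true, List.all_eq_true] at hdom
    exact ⟨fun p hp => (hdom.1 p hp).2, fun p hp => (hdom.2 p hp).2⟩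
  have g1a := getD_mk_bound a "isAvailable" 0 hab.1 (by norm_num)
  have g1b := getD_mk_bound b "isAvailable" 0 hab.2 (by norm_num)
  have g2a := getD_mk_bound a "luckyDayAvailableCopies" 0 hab.1 (by norm_num)
  have g2b := getD_mk_bound b "luckyDayAvailableCopies" 0 hab.2 (by norm_num)
  have g3a := getD_mk_bound a "estimatedWaitDays" 9999 hab.1 (by norm_num)
  have g3b := getD_mk_bound b "estimatedWaitDays" 9999 hab.2 (by norm_num)
  have g4a := getD_mk_bound a "holdsRatio" 9999 hab.1 (by norm_num)
  have g4b := getD_mk_bound b "holdsRatio" 9999 hab.2 (by norm_num)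
  have g5a := getD_mk_bound a "ownedCopies" 0 hab.1 (by norm_num)
  have g5b := getD_mk_bound b "ownedCopies" 0 hab.2 (by norm_num)
  unfold Spec_sort_availabilities sort_availabilities sort_availabilities_alt
  simp only [sortAvailLoop, Bool.false_eq_true, if_true, if_false]
  rw [show ((1 : Int) <<< 36) = 68719476736 from by decide]
  exact packed_sign
    ((PySem.Dict.mk a).getD "isAvailable" 0) ((PySem.Dict.mk b).getD "isAvailable" 0)
    ((PySem.Dict.mk a).getD "luckyDayAvailableCopies" 0) ((PySem.Dict.mk b).getD "luckyDayAvailableCopies" 0)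
    ((PySem.Dict.mk a).getD "estimatedWaitDays" 9999) ((PySem.Dict.mk b).getD "estimatedWaitDays" 9999)
    ((PySem.Dict.mk a).getD "holdsRatio" 9999) ((PySem.Dict.mk b).getD "holdsRatio" 9999)
    ((PySem.Dict.mk a).getD "ownedCopies" 0) ((PySem.Dict.mk b).getD "ownedCopies" 0)
    g1a g1b g2a g2b g3a g3b g4a g4b g5a g5b
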